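-- pv_equiv track=rewrite | github.com/gitpk-0/CodeWars | 6_kyu/Python/string_tops.py | tops
-- ===== SOURCE A (Python) =====
-- def tops(msg):
--     if msg == "":
--         return ""
--
--     arr = [msg[1]]
--
--     i = 6
--     step = 5
--     count = -1
--
--     def find_indices(list_to_check, item_to_find, i):
--         indices = []
--         for index, value in enumerate(msg):
--             if i in indices:
--                 return indices
--             if value == item_to_find:
--                 indices.append(index)
--         return indices
--
--     while i < len(msg):
--         try:
--             if i in find_indices(msg, msg[i], i):
--                 arr.append(msg[i])
--         except IndexError:
--             break
--         step += 4
--         if count < 0: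
--             count += 1
--         i = i + step + count
--
--     output = "".join(arr)[::-1]
--     return output
-- ===== SOURCE B (Python) =====
-- def tops(msg):
--     if msg == "":
--         return ""
--     arr = [msg[1]]
--     m = 0
--     while True:
--         idx = (m + 2) * (2 * m + 3)
--         if idx >= len(msg):
--             break
--         arr.append(msg[idx])
--         m += 1
--     return "".join(arr)[::-1]
-- ===== Notes on version B (the rewrite author's own statement) =====
-- stated objective: faster
-- what changed: B replaces A's step/count accumulator loop and its quadratic per-character find_indices scan with a direct closed-form index generator idx=(m+2)*(2m+3), appending msg[idx] until idx >= len(msg).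
import Mathlib
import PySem

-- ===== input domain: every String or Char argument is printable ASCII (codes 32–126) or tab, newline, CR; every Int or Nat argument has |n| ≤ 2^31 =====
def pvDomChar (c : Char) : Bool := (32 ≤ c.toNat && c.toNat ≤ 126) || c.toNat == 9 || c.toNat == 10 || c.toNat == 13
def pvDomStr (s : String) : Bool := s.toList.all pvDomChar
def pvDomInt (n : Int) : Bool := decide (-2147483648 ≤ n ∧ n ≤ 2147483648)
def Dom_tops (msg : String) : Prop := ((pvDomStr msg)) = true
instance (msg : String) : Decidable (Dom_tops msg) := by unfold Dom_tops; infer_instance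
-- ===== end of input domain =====

-- B replaces A's step/count accumulator loop and its quadratic find_indices helper with a
-- direct closed-form index generator idx = (m+2)*(2m+3); objective: simpler.

-- ===== PORT A =====
-- inner loop of find_indices over enumerate(msg) with its early return
def fiGo (pairs : List (Int × Char)) (item : Char) (i : Int) (indices : List Int) : List Int :=
  match pairs with
  | [] => indices
  | (idx, v) :: rest =>
    if i ∈ indices then indices
    else if v = item then fiGo rest item i (indices ++ [idx])
    else fiGo rest item i indices

-- the Python helper enumerates the closed-over msg, which equals its first argument at every call site
def findIndices (listToCheck : List Char) (item : Char) (i : Int) : List Int :=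
  fiGo (PySem.List.enumerate listToCheck) item i []

-- the while loop; fuel bounds the iteration count (i strictly increases by ≥ 9 per step)
def loopA (chars : List Char) (arr : List Char) (i step count : Int) (fuel : Nat) : List Char :=
  match fuel with
  | 0 => arr
  | fuel + 1 =>
    if i < (chars.length : Int) then
      match PySem.List.pyGet? chars i with
      | none => arr      -- except IndexError: break (unreachable: 0 ≤ i < len)
      | some c =>
        let arr' := if i ∈ findIndices chars c i then arr ++ [c] else arr
        let step' := step + 4
        let count' := if count < 0 then count + 1 else count
        loopA chars arr' (i + step' + count') step' count' fuel
    else arr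

def tops (msg : String) : String :=
  if msg = "" then ""
  else
    match PySem.Str.pyGet? msg 1 with
    | none => ""    -- msg[1] raises IndexError (length-1 msg); excluded by Pre_tops
    | some c =>
      let chars := msg.toList
      String.ofList (loopA chars [c] 6 5 (-1) (chars.length + 1)).reverse

-- ===== PORT B =====
def loopB (chars : List Char) (arr : List Char) (m : Int) (fuel : Nat) : List Char :=
  match fuel with
  | 0 => arr
  | fuel + 1 =>
    let idx := (m + 2) * (2 * m + 3)
    if (chars.length : Int) ≤ idx then arr
    else
      match PySem.List.pyGet? chars idx with
      | none => arr  -- unreachable: 0 ≤ idx < len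
      | some c => loopB chars (arr ++ [c]) (m + 1) fuel

def tops_alt (msg : String) : String :=
  if msg = "" then ""
  else
    match PySem.Str.pyGet? msg 1 with
    | none => ""    -- msg[1] raises IndexError (length-1 msg); excluded by Pre_tops
    | some c =>
      let chars := msg.toList
      String.ofList (loopB chars [c] 0 (chars.length + 1)).reverse

-- ===== PRECONDITION & SPEC =====
-- Pre_ excludes only length-1 strings, on which A (and B) raise IndexError at msg[1].
def Pre_tops (msg : String) : Prop := msg = "" ∨ 2 ≤ msg.toList.length
instance (msg : String) : Decidable (Pre_tops msg) := by unfold Pre_tops; infer_instance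
def pvWitness_tops : String := "abcdefghijklmnop"

def Spec_tops (msg : String) (out : String) : Prop := out = tops_alt msg
instance (msg : String) (out : String) : Decidable (Spec_tops msg out) := by unfold Spec_tops; infer_instance

-- ===== CLAIM (what is proved, stated in full; the proofs are below) =====
def Claim_equal_tops : Prop := ∀ (msg : String), Dom_tops msg → Pre_tops msg → Spec_tops msg (tops msg)

-- ===== LEMMAS AND PROOFS =====

-- find_indices always contains i itself when (i, item) occurs in the enumerated pairs
theorem fiGo_mem (item : Char) (i : Int) :
    ∀ (pairs : List (Int × Char)) (indices : List Int),
      i ∈ indices ∨ (i, item) ∈ pairs → i ∈ fiGo pairs item i indices := by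
  intro pairs
  induction pairs with
  | nil =>
    intro indices h
    simpa [fiGo] using h.resolve_right (by simp)
  | cons p rest ih =>
    intro indices h
    obtain ⟨idx, v⟩ := p
    by_cases hin : i ∈ indices
    · simp [fiGo, hin]
    · rcases h with h | h
      · exact absurd h hin
      · rcases List.mem_cons.mp h with h | h
        · have hidx : idx = i := (Prod.mk.injEq .. ▸ h).1.symm
          have hv : v = item := (Prod.mk.injEq .. ▸ h).2.symm
          subst hidx; subst hv
          simp only [fiGo, if_neg hin]
          exact ih _ (Or.inl (by simp))
        · simp only [fiGo, if_neg hin]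
          split
          · exact ih _ (Or.inr h)
          · exact ih _ (Or.inr h)

theorem findIndices_mem (chars : List Char) (c : Char) (i : Int)
    (hi : 0 ≤ i) (hget : PySem.List.pyGet? chars i = some c) :
    i ∈ findIndices chars c i := by
  apply fiGo_mem
  right
  rw [PySem.List.pyGet?_of_nonneg chars hi] at hget
  have hlt : i.toNat < chars.length := by
    rcases Nat.lt_or_ge i.toNat chars.length with h | h
    · exact h
    · rw [List.getElem?_eq_none h] at hget; cases hget
  have hc : chars[i.toNat] = c := by
    rwa [List.getElem?_eq_getElem hlt, Option.some_inj] at hget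
  rw [PySem.List.mem_enumerate_iff]
  refine ⟨i.toNat, hlt, ?_⟩
  simp [hc, Int.toNat_of_nonneg hi]

theorem loop_eq (chars : List Char) :
    ∀ (fuel : Nat) (arr : List Char) (m count : Int),
      0 ≤ m → (count = -1 ∨ count = 0) →
      loopA chars arr ((m + 2) * (2 * m + 3)) (4 * m + 5) count fuel
        = loopB chars arr m fuel := by
  intro fuel
  induction fuel with
  | zero => intro arr m count _ _; rfl
  | succ fuel ih =>
    intro arr m count hm hc
    have hidx0 : 0 ≤ (m + 2) * (2 * m + 3) := by positivity
    by_cases hlt : (m + 2) * (2 * m + 3) < (chars.length : Int)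
    · have hget := PySem.List.pyGet?_eq_some_getElem chars hidx0 hlt
      set c := chars[((m + 2) * (2 * m + 3)).toNat] with hcdef
      have hmem := findIndices_mem chars c _ hidx0 hget
      have hcount' : (if count < 0 then count + 1 else count) = 0 := by
        rcases hc with h | h <;> simp [h]
      simp only [loopA, loopB, if_pos hlt, if_neg (not_le.mpr hlt), hget, if_pos hmem, hcount']
      have harith : (m + 2) * (2 * m + 3) + (4 * m + 5 + 4) + 0
          = (m + 1 + 2) * (2 * (m + 1) + 3) := by ring
      have hstep : 4 * m + 5 + 4 = 4 * (m + 1) + 5 := by ring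
      rw [harith, hstep]
      exact ih (arr ++ [c]) (m + 1) 0 (by omega) (Or.inr rfl)
    · simp only [loopA, loopB, if_neg hlt, if_pos (not_lt.mp hlt)]

theorem tops_eq_alt (msg : String) : tops msg = tops_alt msg := by
  unfold tops tops_alt
  by_cases h0 : msg = ""
  · simp [h0]
  · simp only [if_neg h0]
    cases hget : PySem.Str.pyGet? msg 1 with
    | none => rfl
    | some c =>
      have h6 : ((0 : Int) + 2) * (2 * 0 + 3) = 6 := by norm_num
      have h5 : 4 * (0 : Int) + 5 = 5 := by norm_num
      have := loop_eq msg.toList (msg.toList.length + 1) [c] 0 (-1) le_rfl (Or.inl rfl)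
      rw [h6, h5] at this
      simp only [this]

-- ===== VERDICT (by name: the statement is the Claim_ definition above) =====
theorem tops_spec : Claim_equal_tops := by
  intro msg _ _
  exact tops_eq_alt msg
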